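-- pv_equiv track=rewrite | github.com/Bukenkere24/Computer-vision-project | src/chain_code.py | _decompose_step
-- ===== SOURCE A (Python) =====
-- from typing import Iterable, List, Tuple
--
-- def _decompose_step(dx: int, dy: int) -> List[Tuple[int, int]]:
--     """Break one grid step (dx,dy) into a list of 8-neighbor unit moves."""
--     out: List[Tuple[int, int]] = []
--     while dx != 0 or dy != 0:
--         if dx != 0 and dy != 0:
--             sx = 1 if dx > 0 else -1
--             sy = 1 if dy > 0 else -1
--         elif dx != 0:
--             sx, sy = (1 if dx > 0 else -1), 0
--         else:
--             sx, sy = 0, (1 if dy > 0 else -1)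
--         out.append((sx, sy))
--         dx -= sx
--         dy -= sy
--     return out
-- ===== SOURCE B (Python) =====
-- from typing import List, Tuple
--
-- def _decompose_step(dx: int, dy: int) -> List[Tuple[int, int]]:
--     """Break one grid step (dx,dy) into a list of 8-neighbor unit moves."""
--     sx = 1 if dx > 0 else (-1 if dx < 0 else 0)
--     sy = 1 if dy > 0 else (-1 if dy < 0 else 0)
--     ax, ay = abs(dx), abs(dy)
--     diag = min(ax, ay)
--     if ax > ay:
--         tail = [(sx, 0)] * (ax - ay)
--     else:
--         tail = [(0, sy)] * (ay - ax)
--     return [(sx, sy)] * diag + tail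
-- ===== Notes on version B (the rewrite author's own statement) =====
-- stated objective: simpler
-- what changed: Replaces the unit-step while loop with a closed form: signs sx,sy plus list multiplication producing min(|dx|,|dy|) diagonal moves followed by the remaining straight moves.
import Mathlib
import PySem

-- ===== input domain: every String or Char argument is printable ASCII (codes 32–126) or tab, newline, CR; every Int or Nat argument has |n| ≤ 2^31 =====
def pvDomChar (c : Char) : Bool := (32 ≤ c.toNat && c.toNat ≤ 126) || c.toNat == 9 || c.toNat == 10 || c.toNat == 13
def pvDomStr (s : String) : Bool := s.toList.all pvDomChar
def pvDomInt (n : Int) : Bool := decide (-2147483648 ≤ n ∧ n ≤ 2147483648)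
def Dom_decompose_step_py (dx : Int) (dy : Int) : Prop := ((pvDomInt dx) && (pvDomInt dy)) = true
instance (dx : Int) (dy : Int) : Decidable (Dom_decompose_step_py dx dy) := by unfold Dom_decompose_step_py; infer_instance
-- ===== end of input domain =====

-- B replaces A's unit-step while loop with a closed form (signs + replicated diagonal then straight moves); objective: simpler.

-- ===== PORT A =====
-- A's while loop becomes structural recursion on |dx| + |dy|; the three sign branches are kept in A's order.
def decompose_step_py (dx : Int) (dy : Int) : List (Int × Int) :=
  if _h : dx ≠ 0 ∨ dy ≠ 0 then
    let s : Int × Int :=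
      if dx ≠ 0 ∧ dy ≠ 0 then ((if dx > 0 then 1 else -1), (if dy > 0 then 1 else -1))
      else if dx ≠ 0 then ((if dx > 0 then 1 else -1), 0)
      else (0, (if dy > 0 then 1 else -1))
    (s.1, s.2) :: decompose_step_py (dx - s.1) (dy - s.2)
  else []
termination_by dx.natAbs + dy.natAbs
decreasing_by
  split_ifs <;> simp_all <;> omega

-- ===== PORT B =====
def decompose_step_py_alt (dx : Int) (dy : Int) : List (Int × Int) :=
  let sx : Int := if dx > 0 then 1 else if dx < 0 then -1 else 0
  let sy : Int := if dy > 0 then 1 else if dy < 0 then -1 else 0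
  let ax := dx.natAbs
  let ay := dy.natAbs
  let diag := min ax ay
  let tail := if ax > ay then List.replicate (ax - ay) (sx, 0)
              else List.replicate (ay - ax) ((0 : Int), sy)
  List.replicate diag (sx, sy) ++ tail

-- ===== PRECONDITION & SPEC =====
def Spec_decompose_step_py (dx : Int) (dy : Int) (out : List (Int × Int)) : Prop := out = decompose_step_py_alt dx dy
instance (dx : Int) (dy : Int) (out : List (Int × Int)) : Decidable (Spec_decompose_step_py dx dy out) := by unfold Spec_decompose_step_py; infer_instance

-- ===== CLAIM (what is proved, stated in full; the proofs are below) =====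
def Claim_equal_decompose_step_py : Prop := ∀ (dx : Int) (dy : Int), Dom_decompose_step_py dx dy → Spec_decompose_step_py dx dy (decompose_step_py dx dy)

-- ===== LEMMAS AND PROOFS =====

def pvSgn (z : Int) : Int := if z > 0 then 1 else if z < 0 then -1 else 0

-- one unfold of A's loop, with its head rewritten as (sgn dx, sgn dy)
theorem A_unfold (dx dy : Int) :
    decompose_step_py dx dy =
      if dx = 0 ∧ dy = 0 then []
      else (pvSgn dx, pvSgn dy) :: decompose_step_py (dx - pvSgn dx) (dy - pvSgn dy) := by
  rw [decompose_step_py.eq_def]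
  by_cases hx : dx = 0 <;> by_cases hy : dy = 0 <;>
    simp [hx, hy, pvSgn] <;> split_ifs <;> simp_all <;> omega

-- B also satisfies the same step equation
theorem alt_eq (dx dy : Int) : decompose_step_py_alt dx dy =
    List.replicate (min dx.natAbs dy.natAbs) (pvSgn dx, pvSgn dy) ++
      (if dy.natAbs < dx.natAbs then List.replicate (dx.natAbs - dy.natAbs) (pvSgn dx, 0)
       else List.replicate (dy.natAbs - dx.natAbs) (0, pvSgn dy)) := rfl

theorem habs (z : Int) : (z - pvSgn z).natAbs = z.natAbs - 1 := by
  simp only [pvSgn]; split_ifs <;> omega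

theorem hsgn2 (z : Int) (h : 2 ≤ z.natAbs) : pvSgn (z - pvSgn z) = pvSgn z := by
  simp only [pvSgn]; split_ifs <;> omega

theorem repl_congr {α : Type} (n : Nat) (p q : α) (h : n ≠ 0 → p = q) :
    List.replicate n p = List.replicate n q := by
  cases n with
  | zero => simp
  | succ m => rw [h (by omega)]

theorem step_core (a b : Nat) (sx sy : Int) (ha : a ≠ 0) (hb : b ≠ 0) :
    List.replicate (min a b) (sx,sy) ++ (if b < a then List.replicate (a-b) (sx,0) else List.replicate (b-a) ((0:Int),sy))
    = (sx,sy) :: (List.replicate (min (a-1) (b-1)) (sx,sy) ++ (if b-1 < a-1 then List.replicate ((a-1)-(b-1)) (sx,0) else List.replicate ((b-1)-(a-1)) ((0:Int),sy))) := by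
  have hmin : min a b = min (a-1) (b-1) + 1 := by omega
  rw [hmin, List.replicate_succ, List.cons_append]
  by_cases hlt : b < a
  · have h1 : b - 1 < a - 1 := by omega
    have h2 : a - 1 - (b - 1) = a - b := by omega
    simp [hlt, h1, h2]
  · have h1 : ¬ (b - 1 < a - 1) := by omega
    have h2 : b - 1 - (a - 1) = b - a := by omega
    simp [hlt, h1, h2]

theorem alt_step (dx dy : Int) (h : ¬(dx = 0 ∧ dy = 0)) :
    decompose_step_py_alt dx dy = (pvSgn dx, pvSgn dy) :: decompose_step_py_alt (dx - pvSgn dx) (dy - pvSgn dy) := by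
  rw [alt_eq, alt_eq, habs dx, habs dy]
  by_cases hx : dx = 0
  · -- dx = 0, dy ≠ 0: pure vertical
    have hy : dy ≠ 0 := fun hy => h ⟨hx, hy⟩
    subst hx
    have e0 : pvSgn 0 = 0 := rfl
    have e1 : (0 : Int) - pvSgn 0 = 0 := rfl
    rw [e1, e0]
    have hb : dy.natAbs = (dy.natAbs - 1) + 1 := by omega
    have hlt : ¬ (dy.natAbs < 0) := by omega
    have hlt2 : ¬ (dy.natAbs - 1 < 0) := by omega
    simp only [Int.natAbs_zero, Nat.zero_min, Nat.sub_zero, hlt, hlt2, List.replicate_zero, List.nil_append]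
    rw [hb, List.replicate_succ]
    exact congrArg _ (congrArg _ (repl_congr _ _ _ (fun hn => by rw [hsgn2 dy (by omega)])).symm)
  · by_cases hy : dy = 0
    · subst hy
      have e0 : pvSgn 0 = 0 := rfl
      have e1 : (0 : Int) - pvSgn 0 = 0 := rfl
      rw [e1, e0]
      have ha : dx.natAbs = (dx.natAbs - 1) + 1 := by omega
      have hlt : (0:Nat) < dx.natAbs := by omega
      simp only [Int.natAbs_zero, Nat.min_zero, Nat.sub_zero, List.replicate_zero, List.nil_append, Nat.zero_sub]
      rw [if_pos hlt]
      by_cases h1 : dx.natAbs = 1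
      · rw [if_neg (by omega : ¬ ((0:Nat) - 1 < dx.natAbs - 1))]
        simp [h1]
      · rw [if_pos (by omega : (0:Nat) - 1 < dx.natAbs - 1)]
        conv_lhs => rw [ha, List.replicate_succ]
        exact congrArg _ (repl_congr _ _ _ (fun hn => by rw [hsgn2 dx (by omega)])).symm
    · -- both nonzero
      have ha : dx.natAbs ≠ 0 := by omega
      have hb : dy.natAbs ≠ 0 := by omega
      rw [repl_congr (min (dx.natAbs-1) (dy.natAbs-1)) (pvSgn (dx - pvSgn dx), pvSgn (dy - pvSgn dy)) (pvSgn dx, pvSgn dy)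
            (fun hn => by rw [hsgn2 dx (by omega), hsgn2 dy (by omega)]),
          repl_congr (dx.natAbs - 1 - (dy.natAbs - 1)) (pvSgn (dx - pvSgn dx), (0:Int)) (pvSgn dx, 0)
            (fun hn => by rw [hsgn2 dx (by omega)]),
          repl_congr (dy.natAbs - 1 - (dx.natAbs - 1)) ((0:Int), pvSgn (dy - pvSgn dy)) (0, pvSgn dy)
            (fun hn => by rw [hsgn2 dy (by omega)])]
      exact step_core dx.natAbs dy.natAbs (pvSgn dx) (pvSgn dy) ha hb


theorem main_eq (n : Nat) : ∀ (dx dy : Int), dx.natAbs + dy.natAbs = n →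
    decompose_step_py dx dy = decompose_step_py_alt dx dy := by
  induction n using Nat.strong_induction_on with
  | _ n ih =>
    intro dx dy hn
    rw [A_unfold]
    by_cases h : dx = 0 ∧ dy = 0
    · simp [h, decompose_step_py_alt]
    · rw [alt_step dx dy h]
      simp only [h, if_false]
      congr 1
      apply ih ((dx - pvSgn dx).natAbs + (dy - pvSgn dy).natAbs) _ _ _ rfl
      subst hn
      simp only [pvSgn]
      split_ifs <;> simp_all <;> omega

-- ===== VERDICT (by name: the statement is the Claim_ definition above) =====
theorem decompose_step_py_spec : Claim_equal_decompose_step_py := by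
  intro dx dy _
  unfold Spec_decompose_step_py
  exact main_eq (dx.natAbs + dy.natAbs) dx dy rfl
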